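-- pv_equiv track=rewrite | github.com/Gnoyh/programmers | ps_131704.py | solution
-- ===== SOURCE A (Python) =====
-- def solution(order):
--     idx = 0
--
--     sub_list = []
--
--     for i in range(1, len(order) + 1):
--         sub_list.append(i)
--
--         while sub_list[-1] == order[idx]:
--             idx += 1
--
--             sub_list.pop()
--
--             if not sub_list:
--                 break
--
--     return idx
-- ===== SOURCE B (Python) =====
-- def solution(order):
--     n = len(order)
--     stack = []
--     next_box = 1
--     delivered = 0
--     for target in order:
--         while next_box <= n and (not stack or stack[-1] != target):
--             stack.append(next_box)
--             next_box += 1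
--         if stack and stack[-1] == target:
--             stack.pop()
--             delivered += 1
--         else:
--             break
--     return delivered
-- ===== Notes on version B (the rewrite author's own statement) =====
-- stated objective: alternative
-- what changed: B drives the simulation by the target sequence (with an early break on the first stall) instead of iterating over the incoming boxes with a nested pop loop; it counts deliveries rather than tracking an index into order.
import Mathlib
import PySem

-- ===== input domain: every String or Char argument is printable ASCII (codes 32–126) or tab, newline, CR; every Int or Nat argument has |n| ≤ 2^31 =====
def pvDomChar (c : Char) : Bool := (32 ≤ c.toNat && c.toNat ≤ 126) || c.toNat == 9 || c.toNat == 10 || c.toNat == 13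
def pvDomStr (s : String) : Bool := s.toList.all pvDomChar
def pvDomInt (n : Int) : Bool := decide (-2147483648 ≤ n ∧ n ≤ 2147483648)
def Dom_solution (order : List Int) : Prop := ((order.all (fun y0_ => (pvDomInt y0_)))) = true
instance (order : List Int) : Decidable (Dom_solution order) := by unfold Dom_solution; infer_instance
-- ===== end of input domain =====

-- B iterates over the target sequence with an early break (counting deliveries) instead of
-- A's loop over the incoming boxes with a nested pop loop; equal return value on every input.

-- ===== PORT A =====
-- A's inner `while sub_list[-1] == order[idx]` loop: the condition is only ever evaluated with a
-- non-empty sub_list (first right after append; after a pop, `if not sub_list: break` fires first),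
-- and then idx < len(order) (pops so far = idx < number of boxes pushed ≤ len), so `order[idx]`
-- never raises; `pyGet? = some t` is exact there.
def innerA (order : List Int) (idx : Int) (sub : List Int) : Int × List Int :=
  match h : sub.getLast? with
  | none => (idx, sub)
  | some t =>
    if PySem.List.pyGet? order idx = some t then
      innerA order (idx + 1) sub.dropLast
    else (idx, sub)
termination_by sub.length
decreasing_by
  cases sub with
  | nil => simp at h
  | cons a l => simp

def solution (order : List Int) : Int :=
  ((PySem.List.pyRange 1 ((order.length : Int) + 1) 1).foldl
    (fun st i => innerA order st.1 (st.2 ++ [i])) ((0 : Int), ([] : List Int))).1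

-- ===== PORT B =====
-- `not stack or stack[-1] != target` is exactly `stack.getLast? ≠ some t`;
-- `stack and stack[-1] == target` is exactly `stack.getLast? = some t`.
def fillB (n t : Int) (stack : List Int) (next : Int) : List Int × Int :=
  if next ≤ n ∧ stack.getLast? ≠ some t then fillB n t (stack ++ [next]) (next + 1)
  else (stack, next)
termination_by (n + 1 - next).toNat
decreasing_by omega

def loopB (n : Int) : List Int → List Int → Int → Int → Int
  | [], _, _, delivered => delivered
  | t :: ts, stack, next, delivered =>
    let p := fillB n t stack next
    if p.1.getLast? = some t then loopB n ts p.1.dropLast p.2 (delivered + 1)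
    else delivered

def solution_alt (order : List Int) : Int :=
  loopB (order.length : Int) order [] 1 0

-- ===== PRECONDITION & SPEC =====
def Spec_solution (order : List Int) (out : Int) : Prop := out = solution_alt order
instance (order : List Int) (out : Int) : Decidable (Spec_solution order out) := by unfold Spec_solution; infer_instance

-- ===== CLAIM (what is proved, stated in full; the proofs are below) =====
def Claim_equal_solution : Prop := ∀ (order : List Int), Dom_solution order → Spec_solution order (solution order)

-- ===== LEMMAS AND PROOFS =====

-- cons-world (head = top of stack) mirrors of the two ports, used only in the proofs
def popC (order : List Int) (idx : Int) (S : List Int) : Int × List Int :=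
  match S with
  | [] => (idx, [])
  | t :: rest =>
    if PySem.List.pyGet? order idx = some t then popC order (idx + 1) rest
    else (idx, t :: rest)

def fillC (n t : Int) (S : List Int) (next : Int) : List Int × Int :=
  if next ≤ n ∧ S.head? ≠ some t then fillC n t (next :: S) (next + 1)
  else (S, next)
termination_by (n + 1 - next).toNat
decreasing_by omega

def runB (n : Int) : List Int → List Int → Int → Int
  | [], _, _ => 0
  | t :: ts, S, next =>
    if (fillC n t S next).1.head? = some t then
      1 + runB n ts (fillC n t S next).1.tail (fillC n t S next).2
    else 0

def runA (order : List Int) (n idx : Int) (S : List Int) (i : Int) : Int × List Int :=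
  if i ≤ n then
    runA order n (popC order idx (i :: S)).1 (popC order idx (i :: S)).2 (i + 1)
  else (idx, S)
termination_by (n + 1 - i).toNat
decreasing_by omega

def Guard (order : List Int) (idx : Int) (S : List Int) : Prop :=
  ∀ t, S.head? = some t → PySem.List.pyGet? order idx ≠ some t

theorem dropLast_reverse' (l : List Int) : l.reverse.dropLast = l.tail.reverse := by
  cases l with
  | nil => rfl
  | cons a l => simp

theorem innerA_reverse (order : List Int) (S : List Int) : ∀ idx,
    innerA order idx S.reverse = ((popC order idx S).1, (popC order idx S).2.reverse) := by
  induction S with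
  | nil => intro idx; simp [innerA, popC]
  | cons t rest ih =>
    intro idx
    rw [List.reverse_cons, innerA]
    split
    · next heq => simp at heq
    · rename_i t1 heq
      rw [List.getLast?_concat] at heq
      injection heq with ht
      subst ht
      rw [List.dropLast_concat]
      simp only [popC]
      by_cases hm : PySem.List.pyGet? order idx = some t
      · rw [if_pos hm, if_pos hm, ih]
      · rw [if_neg hm, if_neg hm]
        simp

theorem fillC_reverse (n t : Int) : ∀ next S,
    fillB n t S.reverse next = ((fillC n t S next).1.reverse, (fillC n t S next).2) := by
  intro next
  induction hk : (n + 1 - next).toNat using Nat.strong_induction_on generalizing next with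
  | _ k ih =>
    intro S
    rw [fillB, fillC]
    by_cases hc : next ≤ n ∧ S.head? ≠ some t
    · have hrev : S.reverse.getLast? = S.head? := by simp
      rw [if_pos (by rw [hrev]; exact hc), if_pos hc]
      have h2 : S.reverse ++ [next] = (next :: S).reverse := by simp
      rw [h2, ih ((n + 1 - (next + 1)).toNat) (by omega) (next + 1) rfl]
    · have hrev : S.reverse.getLast? = S.head? := by simp
      rw [if_neg (by rw [hrev]; exact hc), if_neg hc]

theorem loopB_runB (n : Int) : ∀ (ts S : List Int) (next d : Int),
    loopB n ts S.reverse next d = d + runB n ts S next := by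
  intro ts
  induction ts with
  | nil => intro S next d; simp [loopB, runB]
  | cons t ts ih =>
    intro S next d
    rw [loopB, runB]
    simp only [fillC_reverse n t next S]
    by_cases hh : (fillC n t S next).1.head? = some t
    · rw [if_pos (by simp [hh]), if_pos hh]
      rw [dropLast_reverse', ih]
      omega
    · rw [if_neg (by simp [hh]), if_neg hh]
      omega

theorem foldl_runA (order : List Int) : ∀ (i idx : Int) (S : List Int),
    ((PySem.List.pyRange i ((order.length : Int) + 1) 1).foldl
      (fun st b => innerA order st.1 (st.2 ++ [b])) (idx, S.reverse)) =
    ((runA order (order.length : Int) idx S i).1,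
     (runA order (order.length : Int) idx S i).2.reverse) := by
  intro i
  induction hk : (((order.length : Int)) + 1 - i).toNat using Nat.strong_induction_on generalizing i with
  | _ k ih =>
    intro idx S
    by_cases hi : i ≤ (order.length : Int)
    · conv_rhs => rw [runA, if_pos hi]
      rw [PySem.List.pyRange_one_cons (by omega), List.foldl_cons]
      have h1 : (idx, S.reverse).2 ++ [i] = (i :: S).reverse := by simp
      rw [h1]
      have h2 : (idx, S.reverse).1 = idx := rfl
      rw [h2, innerA_reverse]
      exact ih (((order.length : Int) + 1 - (i + 1)).toNat) (by omega) (i + 1) rfl _ _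
    · rw [PySem.List.pyRange_one_eq_nil (by omega), List.foldl_nil, runA, if_neg hi]

theorem drop_cons_of_pyGet? (order : List Int) (idx t : Int) (h0 : 0 ≤ idx)
    (h : PySem.List.pyGet? order idx = some t) :
    order.drop idx.toNat = t :: order.drop (idx + 1).toNat := by
  rw [PySem.List.pyGet?_of_nonneg order h0] at h
  rw [List.getElem?_eq_some_iff] at h
  obtain ⟨hlt, he⟩ := h
  have h1 : (idx + 1).toNat = idx.toNat + 1 := by omega
  rw [h1, List.drop_eq_getElem_cons hlt, he]

theorem pyGet?_of_drop_cons (order : List Int) (idx t : Int) (h0 : 0 ≤ idx)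
    (ts : List Int) (h : order.drop idx.toNat = t :: ts) :
    PySem.List.pyGet? order idx = some t := by
  rw [PySem.List.pyGet?_of_nonneg order h0]
  have h0' : (order.drop idx.toNat)[0]? = some t := by rw [h]; rfl
  rw [List.getElem?_drop] at h0'
  simpa using h0'

theorem popC_le (order : List Int) (S : List Int) : ∀ idx, idx ≤ (popC order idx S).1 := by
  induction S with
  | nil => intro idx; simp [popC]
  | cons t rest ih =>
    intro idx
    rw [popC]
    by_cases hm : PySem.List.pyGet? order idx = some t
    · rw [if_pos hm]; exact le_trans (by omega) (ih (idx + 1))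
    · rw [if_neg hm]

theorem guard_popC (order : List Int) (S : List Int) : ∀ idx,
    Guard order (popC order idx S).1 (popC order idx S).2 := by
  induction S with
  | nil => intro idx u hu; simp [popC] at hu
  | cons t rest ih =>
    intro idx
    rw [popC]
    by_cases hm : PySem.List.pyGet? order idx = some t
    · rw [if_pos hm]; exact ih (idx + 1)
    · rw [if_neg hm]
      intro u hu
      simp only [List.head?_cons, Option.some.injEq] at hu
      subst hu
      exact hm

theorem runB_pop (order : List Int) (n : Int) (S : List Int) : ∀ idx next, 0 ≤ idx →
    idx + runB n (order.drop idx.toNat) S next =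
    (popC order idx S).1 + runB n (order.drop (popC order idx S).1.toNat) (popC order idx S).2 next := by
  induction S with
  | nil => intro idx next h0; rfl
  | cons t rest ih =>
    intro idx next h0
    rw [popC]
    by_cases hm : PySem.List.pyGet? order idx = some t
    · rw [if_pos hm]
      rw [drop_cons_of_pyGet? order idx t h0 hm]
      have hfill : fillC n t (t :: rest) next = (t :: rest, next) := by
        rw [fillC]; simp
      have hstep : runB n (t :: order.drop (idx + 1).toNat) (t :: rest) next =
          1 + runB n (order.drop (idx + 1).toNat) rest next := by
        rw [runB, hfill]; simp
      rw [hstep]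
      have := ih (idx + 1) next (by omega)
      omega
    · rw [if_neg hm]

theorem main_lemma (order : List Int) (n : Int) (hn : n = (order.length : Int)) :
    ∀ (k : Nat) (i idx : Int) (S : List Int), k = (n + 1 - i).toNat → 0 ≤ idx →
    Guard order idx S →
    (runA order n idx S i).1 = idx + runB n (order.drop idx.toNat) S i := by
  intro k
  induction k using Nat.strong_induction_on with
  | _ k ih =>
    intro i idx S hk h0 hg
    by_cases hi : i ≤ n
    · rw [runA, if_pos hi]
      simp only [popC]
      by_cases hm : PySem.List.pyGet? order idx = some i
      · rw [if_pos hm]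
        have hle := popC_le order S (idx + 1)
        rw [ih (((n : Int) + 1 - (i + 1)).toNat) (by omega) (i + 1) _ _ rfl (by omega)
             (guard_popC order S (idx + 1))]
        rw [← runB_pop order n S (idx + 1) (i + 1) (by omega)]
        rw [drop_cons_of_pyGet? order idx i h0 hm]
        have hne : S.head? ≠ some i := fun hh => hg i hh hm
        have hfill : fillC n i S i = (i :: S, i + 1) := by
          rw [fillC, if_pos ⟨hi, hne⟩, fillC]; simp
        have hstep : runB n (i :: order.drop (idx + 1).toNat) S i =
            1 + runB n (order.drop (idx + 1).toNat) S (i + 1) := by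
          rw [runB, hfill]; simp
        rw [hstep]
        omega
      · rw [if_neg hm]
        have hg' : Guard order idx (i :: S) := by
          intro u hu
          simp only [List.head?_cons, Option.some.injEq] at hu
          subst hu
          exact hm
        rw [ih (((n : Int) + 1 - (i + 1)).toNat) (by omega) (i + 1) idx (i :: S) rfl h0 hg']
        cases hd : order.drop idx.toNat with
        | nil => simp [runB]
        | cons t ts =>
          have hpt : PySem.List.pyGet? order idx = some t :=
            pyGet?_of_drop_cons order idx t h0 ts hd
          have hne : S.head? ≠ some t := fun hh => hg t hh hpt
          rw [runB, runB]
          have hstep : fillC n t S i = fillC n t (i :: S) (i + 1) := by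
            rw [fillC, if_pos ⟨hi, hne⟩]
          rw [hstep]
    · rw [runA, if_neg hi]
      cases hd : order.drop idx.toNat with
      | nil => simp [runB]
      | cons t ts =>
        have hpt : PySem.List.pyGet? order idx = some t :=
          pyGet?_of_drop_cons order idx t h0 ts hd
        have hne : S.head? ≠ some t := fun hh => hg t hh hpt
        rw [runB]
        have hfill : fillC n t S i = (S, i) := by
          rw [fillC, if_neg (by intro hc; exact hi hc.1)]
        rw [hfill, if_neg hne]
        omega

-- ===== VERDICT (by name: the statement is the Claim_ definition above) =====
theorem solution_spec : Claim_equal_solution := by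
  intro order _hdom
  unfold Spec_solution solution solution_alt
  have h1 := foldl_runA order 1 0 []
  simp only [List.reverse_nil] at h1
  rw [h1]
  have h2 := loopB_runB (order.length : Int) order [] 1 0
  simp only [List.reverse_nil] at h2
  rw [h2]
  have h3 := main_lemma order (order.length : Int) rfl ((((order.length : Int)) + 1 - 1).toNat) 1 0 [] rfl le_rfl (by intro t ht; simp at ht)
  simpa using h3
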